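-- pv_equiv track=rewrite | github.com/nanbei45/ARG-DPLM | train.py | clean_sequence
-- ===== SOURCE A (Python) =====
-- def clean_sequence(seq):
--     """
--     Clean the protein sequence and replace all non-standard amino acids with X.
--     :param seq: Original amino acid sequence
--     :return: Cleaned sequence
--     """
--     valid_chars = set("ACDEFGHIKLMNPQRSTVWYBXZOU-")
--
--     ambiguous_map = {
--         'J': 'X',
--         'B': 'X',
--         'Z': 'X',
--         'U': 'X',
--         'O': 'X',
--     }
--
--
--     for amb_char, replacement in ambiguous_map.items():
--         seq = seq.replace(amb_char, replacement)
--
--     cleaned = ''.join(aa if aa in valid_chars else 'X' for aa in seq)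
--
--     return cleaned
-- ===== SOURCE B (Python) =====
-- # Single-pass rewrite: one precomputed set of surviving characters (standard
-- # amino acids plus 'X' and '-'; B/Z/O/U excluded because A maps them to 'X'),
-- # one comprehension instead of five str.replace scans plus a comprehension.
-- _KEEP = frozenset("ACDEFGHIKLMNPQRSTVWYX-")
--
-- def clean_sequence(seq):
--     return ''.join(c if c in _KEEP else 'X' for c in seq)
-- ===== Notes on version B (the rewrite author's own statement) =====
-- stated objective: simpler
-- what changed: Replaced A's five str.replace passes plus a membership comprehension by a single pass over one precomputed frozenset of surviving characters (the 20 standard amino acids plus 'X' and '-').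
import Mathlib
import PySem

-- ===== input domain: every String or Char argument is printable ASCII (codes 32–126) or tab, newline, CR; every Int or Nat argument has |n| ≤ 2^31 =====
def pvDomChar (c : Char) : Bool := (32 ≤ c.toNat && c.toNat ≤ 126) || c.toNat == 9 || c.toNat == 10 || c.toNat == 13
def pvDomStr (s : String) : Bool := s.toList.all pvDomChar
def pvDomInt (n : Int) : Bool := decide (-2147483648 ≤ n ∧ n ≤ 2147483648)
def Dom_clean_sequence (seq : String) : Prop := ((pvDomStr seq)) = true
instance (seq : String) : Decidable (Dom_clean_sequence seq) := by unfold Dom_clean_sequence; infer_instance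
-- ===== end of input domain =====

-- B replaces A's five str.replace passes + membership comprehension by one pass
-- over a single precomputed set of surviving characters (objective: simpler).


-- ===== PORT A =====
def clean_sequence (seq : String) : String :=
  let valid_chars : PySem.Set Char := PySem.Set.ofList "ACDEFGHIKLMNPQRSTVWYBXZOU-".toList
  let ambiguous_map : PySem.Dict Char Char :=
    PySem.Dict.ofList [('J', 'X'), ('B', 'X'), ('Z', 'X'), ('U', 'X'), ('O', 'X')]
  let seq := (PySem.Dict.items ambiguous_map).foldl
    (fun s p => PySem.Str.replace s (String.ofList [p.1]) (String.ofList [p.2])) seq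
  String.ofList (seq.toList.map (fun aa => if valid_chars.contains aa then aa else 'X'))

-- ===== PORT B =====
def cleanKeep : PySem.Set Char := PySem.Set.ofList "ACDEFGHIKLMNPQRSTVWYX-".toList

def clean_sequence_alt (seq : String) : String :=
  String.ofList (seq.toList.map (fun c => if cleanKeep.contains c then c else 'X'))

-- ===== PRECONDITION & SPEC =====
def Spec_clean_sequence (seq : String) (out : String) : Prop := out = clean_sequence_alt seq
instance (seq : String) (out : String) : Decidable (Spec_clean_sequence seq out) := by unfold Spec_clean_sequence; infer_instance

-- ===== CLAIM (what is proved, stated in full; the proofs are below) =====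
def Claim_equal_clean_sequence : Prop := ∀ (seq : String), Dom_clean_sequence seq → Spec_clean_sequence seq (clean_sequence seq)

-- ===== LEMMAS AND PROOFS =====

-- replace.go with a single-character pattern is a pointwise map
theorem go_single (a b : Char) (l : List Char) : ∀ (fuel : Nat) (acc : List Char),
    l.length ≤ fuel →
    PySem.Chars.replace.go [a] [b] fuel l acc
      = acc.reverse ++ l.map (fun c => if c = a then b else c) := by
  induction l with
  | nil => intro fuel acc _; cases fuel <;> simp [PySem.Chars.replace.go]
  | cons c t ih =>
    intro fuel acc hle
    cases fuel with
    | zero => simp at hle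
    | succ n =>
      by_cases hca : a = c
      · subst hca
        simp [PySem.Chars.replace.go, List.isPrefixOf,
          ih n _ (by simpa using hle)]
      · simp [PySem.Chars.replace.go, List.isPrefixOf, hca, Ne.symm hca,
          ih n _ (by simpa using hle)]

theorem replace_single (a b : Char) (l : List Char) :
    PySem.Chars.replace l [a] [b] = l.map (fun c => if c = a then b else c) := by
  simp [PySem.Chars.replace, go_single a b l l.length [] le_rfl]

-- ===== VERDICT (by name: the statement is the Claim_ definition above) =====
theorem clean_sequence_spec : Claim_equal_clean_sequence := by
  unfold Claim_equal_clean_sequence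
  intro seq _
  unfold Spec_clean_sequence
  simp only [clean_sequence, clean_sequence_alt]
  rw [show (PySem.Dict.items (PySem.Dict.ofList [('J', 'X'), ('B', 'X'), ('Z', 'X'), ('U', 'X'), ('O', 'X')]))
        = [('J', 'X'), ('B', 'X'), ('Z', 'X'), ('U', 'X'), ('O', 'X')] from by decide]
  simp only [List.foldl]
  refine congrArg String.ofList ?_
  simp only [PySem.Str.toList_replace, String.toList_ofList, replace_single, List.map_map]
  apply List.map_congr_left
  intro c _
  simp only [Function.comp]
  have hv : (PySem.Set.ofList "ACDEFGHIKLMNPQRSTVWYBXZOU-".toList)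
      = "ACDEFGHIKLMNPQRSTVWYBXZOU-".toList := by decide
  have hk : cleanKeep = "ACDEFGHIKLMNPQRSTVWYX-".toList := by decide
  rw [hv, hk]
  by_cases hJ : c = 'J'
  · subst hJ; decide
  by_cases hB : c = 'B'
  · subst hB; decide
  by_cases hZ : c = 'Z'
  · subst hZ; decide
  by_cases hU : c = 'U'
  · subst hU; decide
  by_cases hO : c = 'O'
  · subst hO; decide
  rw [if_neg hJ, if_neg hB, if_neg hZ, if_neg hU, if_neg hO]
  have hmem : (c ∈ "ACDEFGHIKLMNPQRSTVWYBXZOU-".toList) ↔ (c ∈ "ACDEFGHIKLMNPQRSTVWYX-".toList) := by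
    rw [show "ACDEFGHIKLMNPQRSTVWYBXZOU-".toList
          = ['A','C','D','E','F','G','H','I','K','L','M','N','P','Q','R','S','T','V','W','Y','B','X','Z','O','U','-'] from by decide,
        show "ACDEFGHIKLMNPQRSTVWYX-".toList
          = ['A','C','D','E','F','G','H','I','K','L','M','N','P','Q','R','S','T','V','W','Y','X','-'] from by decide]
    simp [hB, hZ, hU, hO]
  have hc : PySem.Set.contains "ACDEFGHIKLMNPQRSTVWYBXZOU-".toList c
      = PySem.Set.contains "ACDEFGHIKLMNPQRSTVWYX-".toList c := by
    apply Bool.eq_iff_iff.mpr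
    simpa [PySem.Set.contains] using hmem
  rw [hc]
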